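-- pv_equiv track=rewrite | github.com/kbaikov/adventofcode2018 | day05.py | process_stack2
-- ===== SOURCE A (Python) =====
-- from collections import Counter, deque
-- import string
--
-- def react(pair):
--     x, y = pair
--     if x == y:
--         return False
--     if x == y.upper() or y == x.upper():
--         return True
--     return False
--
-- def process_stack(pattern):
--     """Pop if reacts, add if not.
--
--     idea taken from: https://steadbytes.com/blog/advent-of-code-2018/05/"""
--     stack = deque()
--
--     for char in pattern:
--         if stack and react((char, stack[-1])):
--             stack.pop()
--         else:
--             stack.append(char)
--     return len(stack)
--
-- def process_stack2(pattern):
--     """idea taken from: https://steadbytes.com/blog/advent-of-code-2018/05/"""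
--     best = len(pattern)
--
--     for char in string.ascii_lowercase:
--         modified = pattern.replace(char, "")
--         modified = modified.replace(char.upper(), "")
--         modified_reacted_len = process_stack(modified)
--         best = min(best, modified_reacted_len)
--     return best
-- ===== SOURCE B (Python) =====
-- import string
--
--
-- def react(pair):
--     x, y = pair
--     if x == y:
--         return False
--     if x == y.upper() or y == x.upper():
--         return True
--     return False
--
--
-- def process_stack2(pattern):
--     # Fully react the polymer ONCE; removing a unit type commutes with
--     # reaction, so each per-letter pass can run on the (shorter) reduced form.
--     reduced = []
--     for char in pattern:
--         if reduced and react((char, reduced[-1])):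
--             reduced.pop()
--         else:
--             reduced.append(char)
--
--     best = len(pattern)
--     for char in string.ascii_lowercase:
--         upper = char.upper()
--         stack = []
--         for ch in reduced:
--             if ch == char or ch == upper:
--                 continue
--             if stack and react((ch, stack[-1])):
--                 stack.pop()
--             else:
--                 stack.append(ch)
--         best = min(best, len(stack))
--     return best
-- ===== Notes on version B (the rewrite author's own statement) =====
-- stated objective: alternative
-- what changed: B fully reacts the polymer once up front and runs each of the 26 per-letter passes over that pre-reduced polymer with an inline skip-filter, instead of A's 26 passes that each build two replaced copies of the raw input and react from scratch; exactness rests on a proved commutation theorem (filtering a letter pair out of the reduced polymer and re-reducing equals reducing the filtered input).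
import Mathlib
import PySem

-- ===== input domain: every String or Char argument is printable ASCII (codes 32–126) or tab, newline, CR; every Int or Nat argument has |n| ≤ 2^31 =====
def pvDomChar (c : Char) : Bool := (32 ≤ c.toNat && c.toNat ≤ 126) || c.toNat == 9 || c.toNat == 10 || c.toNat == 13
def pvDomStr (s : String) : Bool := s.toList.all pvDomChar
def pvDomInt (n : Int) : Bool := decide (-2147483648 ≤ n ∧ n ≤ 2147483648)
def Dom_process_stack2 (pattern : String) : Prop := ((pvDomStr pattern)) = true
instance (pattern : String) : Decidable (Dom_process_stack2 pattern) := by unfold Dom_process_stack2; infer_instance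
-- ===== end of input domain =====

-- B reacts the polymer once up front and runs each per-letter pass on that pre-reduced
-- polymer with an inline filter (no replaced copies); exact by a reduction/filter
-- commutation theorem proved below. (B mutates nothing the caller can see, like A.)


-- ===== PORT A =====
-- react((x, y)) from the module (shared helper of both Python files)
def pvReact (x y : Char) : Bool :=
  if x == y then false
  else if x == PySem.Chars.upperChar y || y == PySem.Chars.upperChar x then true
  else false

-- one loop step of process_stack: the deque with its BACK at the list HEAD
def pvPush (stack : List Char) (char : Char) : List Char :=
  match stack with
  | top :: rest => if pvReact char top then rest else char :: top :: rest
  | [] => [char]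

-- process_stack(pattern)
def pvProcessStack (pattern : String) : Int :=
  PySem.List.len (pattern.toList.foldl pvPush [])

def pvAsciiLowercase : List Char := "abcdefghijklmnopqrstuvwxyz".toList

def process_stack2 (pattern : String) : Int :=
  pvAsciiLowercase.foldl
    (fun best char =>
      let modified := PySem.Str.replace pattern (String.ofList [char]) ""
      let modified := PySem.Str.replace modified (PySem.Str.upper (String.ofList [char])) ""
      min best (pvProcessStack modified))
    (PySem.Str.len pattern)

-- ===== PORT B =====
def process_stack2_alt (pattern : String) : Int :=
  -- the Python list `reduced` grows at its end; its end is this list's HEAD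
  let reduced := pattern.toList.foldl pvPush []
  pvAsciiLowercase.foldl
    (fun best char =>
      let upper := PySem.Chars.upperChar char
      let stack := reduced.reverse.foldl
        (fun stack ch =>
          if ch == char || ch == upper then stack else pvPush stack ch) []
      min best (PySem.List.len stack))
    (PySem.Str.len pattern)

-- ===== PRECONDITION & SPEC =====
def Spec_process_stack2 (pattern : String) (out : Int) : Prop := out = process_stack2_alt pattern
instance (pattern : String) (out : Int) : Decidable (Spec_process_stack2 pattern out) := by unfold Spec_process_stack2; infer_instance

-- ===== CLAIM (what is proved, stated in full; the proofs are below) =====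
def Claim_equal_process_stack2 : Prop := ∀ (pattern : String), Dom_process_stack2 pattern → Spec_process_stack2 pattern (process_stack2 pattern)

-- ===== LEMMAS AND PROOFS =====

theorem pvCharEq_iff (a b : Char) : a = b ↔ a.toNat = b.toNat :=
  ⟨fun h => h ▸ rfl, fun h => Char.ext (UInt32.toNat_inj.mp h)⟩

theorem pvIslower_iff (c : Char) : PySem.Chars.islower c = true ↔ 97 ≤ c.toNat ∧ c.toNat ≤ 122 := by
  simp only [PySem.Chars.islower, Bool.and_eq_true, decide_eq_true_eq]
  rw [Char.le_def, Char.le_def, UInt32.le_iff_toNat_le, UInt32.le_iff_toNat_le]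
  exact Iff.rfl

theorem pvUpper_toNat {c : Char} (h1 : 97 ≤ c.toNat) (h2 : c.toNat ≤ 122) :
    (PySem.Chars.upperChar c).toNat = c.toNat - 32 := by
  have hl : PySem.Chars.islower c = true := (pvIslower_iff c).mpr ⟨h1, h2⟩
  rw [PySem.Chars.upperChar, if_pos hl, Char.toNat_ofNat, if_pos (Or.inl (by omega))]

theorem pvEqUpper_iff (x y : Char) :
    x = PySem.Chars.upperChar y ↔
      (97 ≤ y.toNat ∧ y.toNat ≤ 122 ∧ x.toNat = y.toNat - 32) ∨
      (¬(97 ≤ y.toNat ∧ y.toNat ≤ 122) ∧ x.toNat = y.toNat) := by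
  by_cases h : PySem.Chars.islower y = true
  · have hb := (pvIslower_iff y).mp h
    rw [PySem.Chars.upperChar, if_pos h, pvCharEq_iff, Char.toNat_ofNat,
      if_pos (Or.inl (by omega))]
    omega
  · have hb : ¬(97 ≤ y.toNat ∧ y.toNat ≤ 122) := fun hc => h ((pvIslower_iff y).mpr hc)
    rw [PySem.Chars.upperChar, if_neg h, pvCharEq_iff]
    omega

theorem pvReact_iff (x y : Char) :
    pvReact x y = true ↔
      (97 ≤ y.toNat ∧ y.toNat ≤ 122 ∧ x.toNat = y.toNat - 32) ∨
      (97 ≤ x.toNat ∧ x.toNat ≤ 122 ∧ y.toNat = x.toNat - 32) := by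
  have h1 := pvEqUpper_iff x y
  have h2 := pvEqUpper_iff y x
  have h3 := pvCharEq_iff x y
  unfold pvReact
  split_ifs with hxy hup
  · simp only [beq_iff_eq] at hxy
    rw [h3] at hxy
    exact iff_of_false (by simp) (by omega)
  · simp only [Bool.or_eq_true, beq_iff_eq] at hup
    rw [h1, h2] at hup
    simp only [beq_iff_eq] at hxy
    rw [h3] at hxy
    exact iff_of_true rfl (by omega)
  · simp only [Bool.or_eq_true, beq_iff_eq, not_or] at hup
    rw [h1, h2] at hup
    simp only [beq_iff_eq] at hxy
    rw [h3] at hxy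
    exact iff_of_false (by simp) (by omega)

theorem pvReact_symm (x y : Char) : pvReact x y = pvReact y x := by
  rw [Bool.eq_iff_iff, pvReact_iff, pvReact_iff]
  omega

theorem pvReact_unique {a b t : Char} (ha : pvReact a t = true) (hb : pvReact b t = true) :
    a = b := by
  rw [pvReact_iff] at ha hb
  rw [pvCharEq_iff]
  omega

-- the per-letter removal predicate (KEEP chars that are not char/upper char)
def pvKeep (c : Char) (ch : Char) : Bool := !(ch == c || ch == PySem.Chars.upperChar c)

-- reacting partners are removed together or kept together
theorem pvKeep_congr {c x y : Char} (hc : PySem.Chars.islower c = true)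
    (h : pvReact x y = true) : pvKeep c x = pvKeep c y := by
  have hcb := (pvIslower_iff c).mp hc
  have hup := pvUpper_toNat hcb.1 hcb.2
  rw [pvReact_iff] at h
  unfold pvKeep
  rw [Bool.eq_iff_iff]
  simp only [Bool.not_eq_true', Bool.or_eq_false_iff, beq_eq_false_iff_ne, ne_eq,
    pvCharEq_iff, hup]
  omega

-- a stack produced by the reduction never holds an adjacent reacting pair
def pvNoReact : List Char → Prop
  | a :: b :: rest => pvReact a b = false ∧ pvNoReact (b :: rest)
  | _ => True

theorem pvNoReact_tail {a : Char} {l : List Char} (h : pvNoReact (a :: l)) : pvNoReact l := by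
  cases l with
  | nil => trivial
  | cons b t => exact h.2

theorem pvNoReact_push {st : List Char} (h : pvNoReact st) (a : Char) :
    pvNoReact (pvPush st a) := by
  cases st with
  | nil => simp [pvPush, pvNoReact]
  | cons t rest =>
    cases h' : pvReact a t with
    | true =>
      have : pvPush (t :: rest) a = rest := by simp [pvPush, h']
      rw [this]
      exact pvNoReact_tail h
    | false =>
      have : pvPush (t :: rest) a = a :: t :: rest := by simp [pvPush, h']
      rw [this]
      exact ⟨h', h⟩

theorem pvNoReact_foldl_from (l : List Char) :
    ∀ st, pvNoReact st → pvNoReact (l.foldl pvPush st) := by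
  induction l with
  | nil => intro st h; exact h
  | cons a t ih => intro st h; exact ih _ (pvNoReact_push h a)

theorem pvNoReact_foldl (l : List Char) : pvNoReact (l.foldl pvPush []) :=
  pvNoReact_foldl_from l [] trivial

-- pushing a reacting pair onto a reduced stack is a no-op
theorem pvPush_push {Y : List Char} {a t : Char} (hr : pvReact a t = true)
    (hY : pvNoReact Y) : pvPush (pvPush Y t) a = Y := by
  cases Y with
  | nil => simp [pvPush, hr]
  | cons y Y' =>
    cases hty : pvReact t y with
    | true =>
      have hay : a = y := pvReact_unique hr (by rw [pvReact_symm]; exact hty)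
      subst hay
      cases Y' with
      | nil => simp [pvPush, hty]
      | cons y' R =>
        obtain ⟨h1, -⟩ := hY
        simp [pvPush, hty, h1]
    | false => simp [pvPush, hty, hr]

-- THE COMMUTATION THEOREM: filtering a partner-closed letter class out of the
-- reduced polymer and re-reducing gives the reduction of the filtered polymer.
theorem pvRed_filter_red (p : Char → Bool)
    (hp : ∀ x y, pvReact x y = true → p x = p y) (l : List Char) :
    ((l.foldl pvPush []).reverse.filter p).foldl pvPush [] = (l.filter p).foldl pvPush [] := by
  induction l using List.reverseRecOn with
  | nil => simp
  | append_singleton l a ih =>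
    rw [List.foldl_append, List.filter_append, List.foldl_append]
    simp only [List.foldl_cons, List.foldl_nil]
    cases hT : l.foldl pvPush [] with
    | nil =>
      rw [hT] at ih
      simp only [List.reverse_nil, List.filter_nil, List.foldl_nil] at ih
      cases hpa : p a <;>
        simp [pvPush, hpa, ← ih]
    | cons t T' =>
      cases hat : pvReact a t with
      | false =>
        have hstep : pvPush (t :: T') a = a :: t :: T' := by simp [pvPush, hat]
        rw [hstep, List.reverse_cons, List.filter_append, List.foldl_append, ← hT, ih]
      | true =>
        have hstep : pvPush (t :: T') a = T' := by simp [pvPush, hat]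
        have hkeep : p a = p t := hp a t hat
        rw [hT] at ih
        rw [List.reverse_cons, List.filter_append, List.foldl_append] at ih
        rw [hstep]
        cases hpa : p a with
        | false =>
          have hpt : p t = false := by rw [← hkeep]; exact hpa
          simp only [List.filter_cons, hpa, hpt, Bool.false_eq_true, if_false,
            List.filter_nil, List.foldl_nil] at ih ⊢
          exact ih
        | true =>
          have hpt : p t = true := by rw [← hkeep]; exact hpa
          simp only [List.filter_cons, hpa, hpt, if_pos, List.filter_nil, List.foldl_cons,
            List.foldl_nil] at ih ⊢
          rw [← ih]
          exact (pvPush_push hat (pvNoReact_foldl _)).symm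

-- the replace loop of A with a one-char pattern and empty replacement is a filter
theorem pvReplace_go (c : Char) (l : List Char) :
    ∀ (acc : List Char) (fuel : Nat), l.length ≤ fuel →
      PySem.Chars.replace.go [c] [] fuel l acc = acc.reverse ++ l.filter (fun ch => ch != c) := by
  induction l with
  | nil =>
    intro acc fuel _
    cases fuel <;> simp [PySem.Chars.replace.go]
  | cons ch t ih =>
    intro acc fuel hf
    cases fuel with
    | zero => simp at hf
    | succ f =>
      rw [PySem.Chars.replace.go]
      by_cases hc : c = ch
      · subst hc
        rw [if_pos (by simp [List.isPrefixOf])]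
        simp only [List.length_cons, List.length_nil, List.drop_succ_cons, List.drop_zero,
          List.reverse_nil, List.nil_append]
        rw [ih acc f (by simp at hf; omega)]
        simp
      · rw [if_neg (by simp [List.isPrefixOf]; exact hc)]
        rw [ih (ch :: acc) f (by simp at hf; omega)]
        simp [Ne.symm hc, bne]

theorem pvReplace_single (s : List Char) (c : Char) :
    PySem.Chars.replace s [c] [] = s.filter (fun ch => ch != c) := by
  rw [PySem.Chars.replace, if_neg (by simp)]
  simpa using pvReplace_go c s [] s.length le_rfl

set_option maxRecDepth 10000 in
theorem pvLetters_lower : ∀ c ∈ pvAsciiLowercase, PySem.Chars.islower c = true := by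
  have h : pvAsciiLowercase.all PySem.Chars.islower = true := by rfl
  simpa [List.all_eq_true] using h

-- per-letter equality of the two loop bodies
theorem pvBody_eq (pattern : String) (c : Char) (hc : PySem.Chars.islower c = true) :
    pvProcessStack (PySem.Str.replace (PySem.Str.replace pattern (String.ofList [c]) "")
        (PySem.Str.upper (String.ofList [c])) "") =
      PySem.List.len
        (((pattern.toList.foldl pvPush []).reverse.foldl
          (fun stack ch =>
            if ch == c || ch == PySem.Chars.upperChar c then stack else pvPush stack ch) [])) := by
  have hAlist :
      (PySem.Str.replace (PySem.Str.replace pattern (String.ofList [c]) "")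
        (PySem.Str.upper (String.ofList [c])) "").toList
        = pattern.toList.filter (pvKeep c) := by
    rw [PySem.Str.toList_replace, PySem.Str.toList_replace]
    simp only [String.toList_ofList, PySem.Str.toList_upper, PySem.Chars.upper, List.map_cons,
      List.map_nil, String.toList_empty]
    rw [pvReplace_single, pvReplace_single, List.filter_filter]
    apply List.filter_congr
    intro ch _
    simp [pvKeep, Bool.not_or, bne, Bool.and_comm]
  have hB :
      ((pattern.toList.foldl pvPush []).reverse.foldl
          (fun stack ch =>
            if ch == c || ch == PySem.Chars.upperChar c then stack else pvPush stack ch) [])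
        = ((pattern.toList.foldl pvPush []).reverse.filter (pvKeep c)).foldl pvPush [] := by
    rw [List.foldl_filter]
    apply PySem.List.foldl_congr_mem
    intro acc x _
    by_cases h : (x == c || x == PySem.Chars.upperChar c) = true
    · simp [pvKeep, h]
    · simp [pvKeep, h]
  unfold pvProcessStack
  rw [hAlist, hB, pvRed_filter_red (pvKeep c) (fun x y h => pvKeep_congr hc h)]

-- ===== VERDICT (by name: the statement is the Claim_ definition above) =====
theorem process_stack2_spec : Claim_equal_process_stack2 := by
  intro pattern _
  unfold Spec_process_stack2 process_stack2 process_stack2_alt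
  apply PySem.List.foldl_congr_mem
  intro best c hc
  have hlow := pvLetters_lower c hc
  dsimp only
  rw [pvBody_eq pattern c hlow]
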